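-- pv_equiv track=rewrite | github.com/macclaw2026-byte/JinClaw | tools/openmoss/control_center/challenge_classifier.py | _severity_from_signals
-- ===== SOURCE A (Python) =====
-- from typing import Any, Dict, List
--
-- def _severity_from_signals(signals: List[Dict[str, Any]]) -> str:
--     """
--     中文注解：
--     - 功能：从多个 challenge signal 归并整体严重度。
--     - 设计意图：让下游能快速判断是轻微波动、受限但可切换、还是必须停到人工/审批面。
--     """
--     if any(str(item.get("severity", "")).strip() == "high" for item in signals):
--         return "high"
--     if any(str(item.get("severity", "")).strip() == "medium" for item in signals):
--         return "medium"
--     if any(str(item.get("severity", "")).strip() == "low" for item in signals):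
--         return "low"
--     return "none"
-- ===== SOURCE B (Python) =====
-- def _severity_from_signals(signals):
--     rank = {"high": 3, "medium": 2, "low": 1}
--     best = 0
--     for item in signals:
--         best = max(best, rank.get(str(item.get("severity", "")).strip(), 0))
--     return {3: "high", 2: "medium", 1: "low"}.get(best, "none")
-- ===== Notes on version B (the rewrite author's own statement) =====
-- stated objective: alternative
-- what changed: Replaces A's three separate any-scans (one per severity level) with a single pass that maintains the maximum numeric severity rank seen, translated back to a name at the end.
import Mathlib
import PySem

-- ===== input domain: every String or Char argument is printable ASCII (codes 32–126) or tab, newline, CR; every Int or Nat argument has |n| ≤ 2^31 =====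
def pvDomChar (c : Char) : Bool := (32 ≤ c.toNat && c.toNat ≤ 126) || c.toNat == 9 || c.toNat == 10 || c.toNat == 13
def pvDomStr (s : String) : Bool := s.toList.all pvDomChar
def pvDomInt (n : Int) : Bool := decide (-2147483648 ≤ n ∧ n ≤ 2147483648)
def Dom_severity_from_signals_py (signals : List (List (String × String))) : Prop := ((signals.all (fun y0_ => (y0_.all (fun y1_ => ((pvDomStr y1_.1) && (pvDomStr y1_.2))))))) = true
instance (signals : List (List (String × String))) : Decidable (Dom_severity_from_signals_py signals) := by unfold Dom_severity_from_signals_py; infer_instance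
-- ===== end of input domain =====

-- One honest line: B replaces A's three any-scans with one pass keeping the max severity rank; same O(n), single traversal.

-- shared helper: str(item.get("severity", "")).strip()  (dict lookup = first match in the association list)
def pvSev (item : List (String × String)) : String :=
  PySem.Str.strip (((item.find? (fun p => p.1 == "severity")).map Prod.snd).getD "")

-- ===== PORT A =====
def severity_from_signals_py (signals : List (List (String × String))) : String :=
  if signals.any (fun item => pvSev item == "high") then "high"
  else if signals.any (fun item => pvSev item == "medium") then "medium"
  else if signals.any (fun item => pvSev item == "low") then "low"
  else "none"

-- ===== PORT B =====
-- rank.get(key, 0) for the literal dict {"high":3,"medium":2,"low":1}, written as the first-match chain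
def pvRank (s : String) : Nat :=
  if s == "high" then 3 else if s == "medium" then 2 else if s == "low" then 1 else 0

def severity_from_signals_py_alt (signals : List (List (String × String))) : String :=
  let best := signals.foldl (fun b item => max b (pvRank (pvSev item))) 0
  if best == 3 then "high" else if best == 2 then "medium" else if best == 1 then "low" else "none"

-- ===== PRECONDITION & SPEC =====
def Spec_severity_from_signals_py (signals : List (List (String × String))) (out : String) : Prop := out = severity_from_signals_py_alt signals
instance (signals : List (List (String × String))) (out : String) : Decidable (Spec_severity_from_signals_py signals out) := by unfold Spec_severity_from_signals_py; infer_instance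

-- ===== CLAIM (what is proved, stated in full; the proofs are below) =====
def Claim_equal_severity_from_signals_py : Prop := ∀ (signals : List (List (String × String))), Dom_severity_from_signals_py signals → Spec_severity_from_signals_py signals (severity_from_signals_py signals)

-- ===== LEMMAS AND PROOFS =====
def pvM (l : List (List (String × String))) : Nat :=
  l.foldl (fun b item => max b (pvRank (pvSev item))) 0

theorem pvFoldl_max_shift (l : List (List (String × String))) (b : Nat) :
    l.foldl (fun b item => max b (pvRank (pvSev item))) b = max b (pvM l) := by
  induction l generalizing b with
  | nil => simp [pvM]
  | cons i t ih =>
    simp only [List.foldl_cons, pvM] at *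
    rw [ih, ih (max 0 _)]
    omega

theorem pvM_cons (i : List (String × String)) (l : List (List (String × String))) :
    pvM (i :: l) = max (pvRank (pvSev i)) (pvM l) := by
  have h0 : pvM (i :: l) = l.foldl (fun b item => max b (pvRank (pvSev item))) (max 0 (pvRank (pvSev i))) := rfl
  rw [h0, pvFoldl_max_shift]
  omega

theorem pvRank_le (s : String) : pvRank s ≤ 3 := by
  unfold pvRank; split_ifs <;> omega

theorem pvM_le (l : List (List (String × String))) : pvM l ≤ 3 := by
  induction l with
  | nil => simp [pvM]
  | cons i t ih => rw [pvM_cons]; have := pvRank_le (pvSev i); omega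

theorem pvAnyHigh (l : List (List (String × String))) :
    l.any (fun item => pvSev item == "high") = decide (pvM l = 3) := by
  induction l with
  | nil => simp [pvM]
  | cons i t ih =>
    rw [List.any_cons, ih, pvM_cons]
    have ht := pvM_le t
    by_cases h : pvSev i = "high"
    · have hr : pvRank (pvSev i) = 3 := by rw [h]; rfl
      have hm : max (pvRank (pvSev i)) (pvM t) = 3 := by omega
      have hb : (pvSev i == "high") = true := by simp [h]
      simp [hb, hm]
    · have hr : pvRank (pvSev i) ≤ 2 := by
        unfold pvRank; split_ifs with h1 h2 h3 <;> simp_all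
      have hiff : (pvM t = 3) ↔ (max (pvRank (pvSev i)) (pvM t) = 3) := by omega
      have hb : (pvSev i == "high") = false := by simp [h]
      rw [hb, Bool.false_or]
      exact decide_eq_decide.mpr hiff

theorem pvAnyMed (l : List (List (String × String))) (hle : pvM l ≤ 2) :
    l.any (fun item => pvSev item == "medium") = decide (pvM l = 2) := by
  induction l with
  | nil => simp [pvM]
  | cons i t ih =>
    rw [pvM_cons] at hle
    have ht : pvM t ≤ 2 := by omega
    rw [List.any_cons, ih ht, pvM_cons]
    by_cases h : pvSev i = "medium"
    · have hr : pvRank (pvSev i) = 2 := by rw [h]; rfl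
      have hm : max (pvRank (pvSev i)) (pvM t) = 2 := by omega
      have hb : (pvSev i == "medium") = true := by simp [h]
      simp [hb, hm]
    · have hr : pvRank (pvSev i) ≠ 2 := by
        unfold pvRank; split_ifs with h1 h2 h3 <;> simp_all
      have hiff : (pvM t = 2) ↔ (max (pvRank (pvSev i)) (pvM t) = 2) := by omega
      have hb : (pvSev i == "medium") = false := by simp [h]
      rw [hb, Bool.false_or]
      exact decide_eq_decide.mpr hiff

theorem pvAnyLow (l : List (List (String × String))) (hle : pvM l ≤ 1) :
    l.any (fun item => pvSev item == "low") = decide (pvM l = 1) := by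
  induction l with
  | nil => simp [pvM]
  | cons i t ih =>
    rw [pvM_cons] at hle
    have ht : pvM t ≤ 1 := by omega
    rw [List.any_cons, ih ht, pvM_cons]
    by_cases h : pvSev i = "low"
    · have hr : pvRank (pvSev i) = 1 := by rw [h]; rfl
      have hm : max (pvRank (pvSev i)) (pvM t) = 1 := by omega
      have hb : (pvSev i == "low") = true := by simp [h]
      simp [hb, hm]
    · have hr : pvRank (pvSev i) ≠ 1 := by
        unfold pvRank; split_ifs with h1 h2 h3 <;> simp_all
      have hiff : (pvM t = 1) ↔ (max (pvRank (pvSev i)) (pvM t) = 1) := by omega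
      have hb : (pvSev i == "low") = false := by simp [h]
      rw [hb, Bool.false_or]
      exact decide_eq_decide.mpr hiff

-- ===== VERDICT (by name: the statement is the Claim_ definition above) =====
theorem severity_from_signals_py_spec : Claim_equal_severity_from_signals_py := by
  intro signals _
  show severity_from_signals_py signals = severity_from_signals_py_alt signals
  unfold severity_from_signals_py severity_from_signals_py_alt
  show _ = (if pvM signals == 3 then "high" else if pvM signals == 2 then "medium"
            else if pvM signals == 1 then "low" else "none")
  have h3 := pvM_le signals
  rw [pvAnyHigh]
  by_cases hH : pvM signals = 3
  · simp [hH]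
  · have hle2 : pvM signals ≤ 2 := by omega
    rw [pvAnyMed signals hle2]
    by_cases hM : pvM signals = 2
    · simp [hM]
    · have hle1 : pvM signals ≤ 1 := by omega
      rw [pvAnyLow signals hle1]
      by_cases hL : pvM signals = 1
      · simp [hL]
      · simp [hH, hM, hL]
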